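-- pv_equiv track=rewrite | github.com/Mitaka001/PythonAdvancedSolutions | functions_advanced/negative_vs_positive.py | positive_and_negative
-- ===== SOURCE A (Python) =====
-- def positive_and_negative(numbers):
--     negative = []
--     positive = []
--
--     for number in numbers:
--         num = int(number)
--         if num < 0:
--             negative.append(num)
--         else:
--             positive.append(num)
--
--     def strongest_numbers():
--         if abs(sum(negative)) > sum(positive):
--             return "The negatives are stronger than the positives"
--         if abs(sum(negative)) < sum(positive):
--             return "The positives are stronger than the negatives"
--
--     return f"{sum(negative)}\n{sum(positive)}\n{strongest_numbers()}"
-- ===== SOURCE B (Python) =====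
-- def positive_and_negative(numbers):
--     nums = [int(number) for number in numbers]
--     total = sum(nums)
--     neg = sum(n for n in nums if n < 0)
--     if total < 0:
--         verdict = "The negatives are stronger than the positives"
--     elif total > 0:
--         verdict = "The positives are stronger than the negatives"
--     else:
--         verdict = None
--     return f"{neg}\n{total - neg}\n{verdict}"
-- ===== Notes on version B (the rewrite author's own statement) =====
-- stated objective: alternative
-- what changed: Instead of splitting into two sign buckets and comparing their magnitudes, B computes the grand total and the negative part only, derives the positive part by subtraction, and decides the verdict purely from the sign of the total, using that abs(neg) > pos iff neg + pos < 0 when neg <= 0.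
import Mathlib
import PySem

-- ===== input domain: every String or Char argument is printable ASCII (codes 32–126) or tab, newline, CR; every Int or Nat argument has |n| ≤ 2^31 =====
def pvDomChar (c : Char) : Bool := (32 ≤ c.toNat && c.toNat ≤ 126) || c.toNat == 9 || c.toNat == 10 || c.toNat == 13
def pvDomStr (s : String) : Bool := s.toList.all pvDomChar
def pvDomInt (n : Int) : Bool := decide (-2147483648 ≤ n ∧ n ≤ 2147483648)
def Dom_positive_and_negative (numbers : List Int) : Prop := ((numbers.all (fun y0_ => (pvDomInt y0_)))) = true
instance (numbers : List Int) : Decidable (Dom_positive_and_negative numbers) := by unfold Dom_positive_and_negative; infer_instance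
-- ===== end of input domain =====

-- B replaces the two sign buckets by total-sum + negative-part: the verdict is decided
-- from the sign of the total (abs(neg) > pos iff neg + pos < 0 when neg ≤ 0) and the
-- positive sum is recovered by subtraction; same return value ("alternative" objective).
-- ===== PORT A =====
def positive_and_negative (numbers : List Int) : String :=
  let lists := numbers.foldl (fun (acc : List Int × List Int) num =>
    if num < 0 then (acc.1 ++ [num], acc.2) else (acc.1, acc.2 ++ [num])) ([], [])
  let negSum := lists.1.foldl (· + ·) 0
  let posSum := lists.2.foldl (· + ·) 0
  let strongest : String :=
    if |negSum| > posSum then "The negatives are stronger than the positives"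
    else if |negSum| < posSum then "The positives are stronger than the negatives"
    else "None"  -- the helper falls through and returns None; the f-string prints "None"
  PySem.Int.toStr negSum ++ "\n" ++ PySem.Int.toStr posSum ++ "\n" ++ strongest

-- ===== PORT B =====
def positive_and_negative_alt (numbers : List Int) : String :=
  let total := numbers.foldl (· + ·) 0
  let neg := (numbers.filter (fun n => n < 0)).foldl (· + ·) 0
  let verdict : String :=
    if total < 0 then "The negatives are stronger than the positives"
    else if total > 0 then "The positives are stronger than the negatives"
    else "None"  -- Python's verdict is None here; the f-string prints "None"
  PySem.Int.toStr neg ++ "\n" ++ PySem.Int.toStr (total - neg) ++ "\n" ++ verdict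

-- ===== PRECONDITION & SPEC =====
def Spec_positive_and_negative (numbers : List Int) (out : String) : Prop := out = positive_and_negative_alt numbers
instance (numbers : List Int) (out : String) : Decidable (Spec_positive_and_negative numbers out) := by unfold Spec_positive_and_negative; infer_instance

-- ===== CLAIM (what is proved, stated in full; the proofs are below) =====
def Claim_equal_positive_and_negative : Prop := ∀ (numbers : List Int), Dom_positive_and_negative numbers → Spec_positive_and_negative numbers (positive_and_negative numbers)

-- ===== LEMMAS AND PROOFS =====

-- A's fold splits the list into its negative and non-negative sublists (in order).
theorem pn_fold_split (numbers : List Int) (na pa : List Int) :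
    numbers.foldl (fun (acc : List Int × List Int) num =>
        if num < 0 then (acc.1 ++ [num], acc.2) else (acc.1, acc.2 ++ [num])) (na, pa)
    = (na ++ numbers.filter (fun n => decide (n < 0)),
       pa ++ numbers.filter (fun n => decide (0 ≤ n))) := by
  induction numbers generalizing na pa with
  | nil => simp
  | cons x xs ih =>
    simp only [List.foldl_cons]
    by_cases h : x < 0 <;> simp [h, ih, not_lt.mp]

-- The negative and non-negative parts sum to the total.
theorem pn_sum_parts (numbers : List Int) :
    (numbers.filter (fun n => decide (n < 0))).sum
      + (numbers.filter (fun n => decide (0 ≤ n))).sum = numbers.sum := by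
  induction numbers with
  | nil => simp
  | cons x xs ih =>
    by_cases h : x < 0 <;> simp [h, not_lt.mp] <;> omega

-- The sum of the negative part is nonpositive.
theorem pn_neg_nonpos (numbers : List Int) :
    (numbers.filter (fun n => decide (n < 0))).sum ≤ 0 := by
  induction numbers with
  | nil => simp
  | cons x xs ih => by_cases h : x < 0 <;> simp [h] <;> omega

-- ===== VERDICT (by name: the statement is the Claim_ definition above) =====
theorem positive_and_negative_spec : Claim_equal_positive_and_negative := by
  intro numbers _
  unfold Spec_positive_and_negative positive_and_negative positive_and_negative_alt
  rw [pn_fold_split numbers [] []]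
  simp only [List.nil_append, ← List.sum_eq_foldl]
  have hparts := pn_sum_parts numbers
  have hneg := pn_neg_nonpos numbers
  set ns := (numbers.filter (fun n => decide (n < 0))).sum with hns
  set ps := (numbers.filter (fun n => decide (0 ≤ n))).sum with hps
  have h1 : ps = numbers.sum - ns := by omega
  rw [h1, abs_of_nonpos hneg]
  by_cases hA : numbers.sum < 0
  · simp [hA, show -ns > numbers.sum - ns by omega]
  · by_cases hB : numbers.sum > 0
    · simp [hA, hB, show ¬(-ns > numbers.sum - ns) by omega, show -ns < numbers.sum - ns by omega]
    · simp [hA, hB, show ¬(-ns > numbers.sum - ns) by omega, show ¬(-ns < numbers.sum - ns) by omega]
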